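-- pv_equiv track=rewrite | github.com/SilentVqice/Discord-Bot | cogs/Utility/tickets.py | get_claimed_by
-- ===== SOURCE A (Python) =====
-- def get_claimed_by(topic: str | None) -> int | None:
--     if not topic:
--         return None
--
--     parts = topic.split(";")
--     for part in parts:
--         if part.startswith("claimed-by:"):
--             try:
--                 return int(part.split(":", 1)[1])
--             except ValueError:
--                 return None
--     return None
-- ===== SOURCE B (Python) =====
-- def get_claimed_by(topic):
--     if not topic:
--         return None
--     s = ";" + topic
--     i = s.find(";claimed-by:")
--     if i < 0:
--         return None
--     payload = s[i + 12:]
--     j = payload.find(";")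
--     try:
--         return int(payload[:j] if j >= 0 else payload)
--     except ValueError:
--         return None
-- ===== Notes on version B (the rewrite author's own statement) =====
-- stated objective: alternative
-- what changed: B never splits the topic into parts or loops over them: it prepends ';' and does one substring search s.find(';claimed-by:') to locate the first qualifying part directly, then slices the payload up to the next ';'; the part boundary condition is encoded in the search pattern instead of a loop.
import Mathlib
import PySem

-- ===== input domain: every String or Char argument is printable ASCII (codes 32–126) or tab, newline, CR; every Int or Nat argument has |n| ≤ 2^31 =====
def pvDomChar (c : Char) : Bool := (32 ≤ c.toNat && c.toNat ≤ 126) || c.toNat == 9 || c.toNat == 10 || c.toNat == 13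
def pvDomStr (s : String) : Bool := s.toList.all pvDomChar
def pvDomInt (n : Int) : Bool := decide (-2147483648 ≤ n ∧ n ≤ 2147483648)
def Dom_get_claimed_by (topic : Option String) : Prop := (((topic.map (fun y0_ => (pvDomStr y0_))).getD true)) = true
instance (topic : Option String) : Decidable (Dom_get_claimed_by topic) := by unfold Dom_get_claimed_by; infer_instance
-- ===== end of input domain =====

-- B replaces A's split-into-parts loop by a single substring search: prepend ';' and find the
-- first occurrence of ";claimed-by:", then slice the payload up to the next ';' — an
-- alternative of the same cost with no per-part loop.


-- ===== PORT A =====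
-- the for-loop over topic.split(";")
def get_claimed_by_loop : List (List Char) → Option Int
  | [] => none
  | part :: parts =>
    if PySem.Chars.startswith part "claimed-by:".toList then
      -- int(part.split(":", 1)[1]), ValueError caught as None; the [1]-index always exists
      -- because part starts with "claimed-by:" (which contains ':'), so the none arm is unreachable
      match PySem.List.pyGet? (PySem.Chars.splitOnMax part [':'] 1) 1 with
      | some payload => PySem.Int.ofChars? payload
      | none => none
    else get_claimed_by_loop parts

def get_claimed_by (topic : Option String) : Option Int :=
  match topic with
  | none => none
  | some t =>
    if t.toList.isEmpty then none   -- "if not topic" (None handled by the outer match)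
    else get_claimed_by_loop (PySem.Chars.splitOn t.toList [';'])

-- ===== PORT B =====
def get_claimed_by_alt (topic : Option String) : Option Int :=
  match topic with
  | none => none
  | some t =>
    if t.toList.isEmpty then none   -- "if not topic"
    else
      -- s = ";" + topic; i = s.find(";claimed-by:")
      let s := ';' :: t.toList
      let i := PySem.Chars.find s ";claimed-by:".toList
      if i < 0 then none
      else
        -- payload = s[i+12:]; j = payload.find(";")
        let payload := PySem.Chars.slice s (some (i + 12)) none
        let j := PySem.Chars.find payload [';']
        -- int(payload[:j] if j >= 0 else payload), ValueError caught as None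
        PySem.Int.ofChars? (if 0 ≤ j then PySem.Chars.slice payload none (some j) else payload)

-- ===== PRECONDITION & SPEC =====
def Spec_get_claimed_by (topic : Option String) (out : Option Int) : Prop := out = get_claimed_by_alt topic
instance (topic : Option String) (out : Option Int) : Decidable (Spec_get_claimed_by topic out) := by unfold Spec_get_claimed_by; infer_instance

-- ===== CLAIM (what is proved, stated in full; the proofs are below) =====
def Claim_equal_get_claimed_by : Prop := ∀ (topic : Option String), Dom_get_claimed_by topic → Spec_get_claimed_by topic (get_claimed_by topic)

-- ===== LEMMAS AND PROOFS =====

-- the B computation on the character list (s = ';' :: l), written let-free for the induction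
def pvB (l : List Char) : Option Int :=
  if PySem.Chars.find (';' :: l) ";claimed-by:".toList < 0 then none
  else
    PySem.Int.ofChars?
      (if 0 ≤ PySem.Chars.find
          (PySem.Chars.slice (';' :: l)
            (some (PySem.Chars.find (';' :: l) ";claimed-by:".toList + 12)) none) [';'] then
        PySem.Chars.slice
          (PySem.Chars.slice (';' :: l)
            (some (PySem.Chars.find (';' :: l) ";claimed-by:".toList + 12)) none) none
          (some (PySem.Chars.find
            (PySem.Chars.slice (';' :: l)
              (some (PySem.Chars.find (';' :: l) ";claimed-by:".toList + 12)) none) [';']))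
      else
        PySem.Chars.slice (';' :: l)
          (some (PySem.Chars.find (';' :: l) ";claimed-by:".toList + 12)) none)

-- pvB's body in the exact syntactic form used by the rewrites below
theorem pvB_eq (l : List Char) : pvB l =
    if PySem.Chars.find (';' :: l) ";claimed-by:".toList < 0 then none
    else
      PySem.Int.ofChars?
        (if 0 ≤ PySem.Chars.find
            (PySem.Chars.slice (';' :: l)
              (some (PySem.Chars.find (';' :: l) ";claimed-by:".toList + 12)) none) [';'] then
          PySem.Chars.slice
            (PySem.Chars.slice (';' :: l)
              (some (PySem.Chars.find (';' :: l) ";claimed-by:".toList + 12)) none) none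
            (some (PySem.Chars.find
              (PySem.Chars.slice (';' :: l)
                (some (PySem.Chars.find (';' :: l) ";claimed-by:".toList + 12)) none) [';']))
        else
          PySem.Chars.slice (';' :: l)
            (some (PySem.Chars.find (';' :: l) ";claimed-by:".toList + 12)) none) := rfl

-- the parts of l split on ';', as a structural recursion (proof-only helper)
def pvParts (l : List Char) : List (List Char) :=
  l.takeWhile (· ≠ ';') ::
    (if h : ';' ∈ l then pvParts ((l.dropWhile (· ≠ ';')).tail) else [])
termination_by l.length
decreasing_by
  have h1 : l.dropWhile (· ≠ ';') ≠ [] := by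
    intro hnil
    have := (List.dropWhile_eq_nil_iff).mp hnil ';' h
    simp at this
  have h2 : (l.dropWhile (· ≠ ';')).length ≤ l.length := List.length_dropWhile_le _ _
  have h3 : 0 < (l.dropWhile (· ≠ ';')).length := List.length_pos_iff.mpr h1
  simp only [List.length_tail]
  omega

theorem pvParts_head_tail (l : List Char) :
    pvParts l = l.takeWhile (· ≠ ';') :: (pvParts l).tail := by
  conv_lhs => rw [pvParts]
  conv_rhs => rw [pvParts]
  simp

theorem pvParts_tail_cons (c : Char) (rest : List Char) (hc : c ≠ ';') :
    (pvParts (c :: rest)).tail = (pvParts rest).tail := by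
  have hd : List.dropWhile (fun x => decide (x ≠ ';')) (c :: rest) =
      List.dropWhile (fun x => decide (x ≠ ';')) rest := by
    simp [hc]
  have hm : (';' ∈ c :: rest) ↔ (';' ∈ rest) := by
    simp
    intro hh
    exact absurd hh.symm hc
  conv_lhs => rw [pvParts]
  conv_rhs => rw [pvParts]
  simp only [List.tail_cons, hd]
  by_cases h2 : ';' ∈ rest
  · simp [hm, h2]
  · simp [hm, h2]

theorem pv_go_split : ∀ (fuel : Nat) (l cur : List Char) (acc : List (List Char)),
    l.length < fuel →
    PySem.Chars.splitOn.go [';'] fuel l cur acc =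
      acc.reverse ++ (cur.reverse ++ l.takeWhile (· ≠ ';')) :: (pvParts l).tail := by
  intro fuel
  induction fuel with
  | zero => intro l cur acc h; omega
  | succ f ih =>
    intro l cur acc h
    match l with
    | [] => simp [PySem.Chars.splitOn.go, pvParts]
    | c :: rest =>
      by_cases hc : c = ';'
      · subst hc
        rw [PySem.Chars.splitOn.go]
        have hpre : [';'].isPrefixOf (';' :: rest) = true := by simp [List.isPrefixOf]
        rw [hpre]
        simp only [if_true, List.length_cons] at *
        simp only [List.length_nil, List.drop_succ_cons, List.drop_zero]
        rw [ih rest [] (cur.reverse :: acc) (by omega)]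
        have ht : (pvParts (';' :: rest)).tail = pvParts rest := by
          rw [pvParts]
          simp [List.dropWhile]
        rw [ht, pvParts_head_tail rest]
        simp
      · rw [PySem.Chars.splitOn.go]
        have hpre : [';'].isPrefixOf (c :: rest) = false := by
          simp [List.isPrefixOf]
          exact fun hh => absurd hh.symm hc
        rw [hpre]
        simp only [Bool.false_eq_true, if_false]
        simp only [List.length_cons] at h
        rw [ih rest (c :: cur) acc (by omega)]
        rw [pvParts_tail_cons c rest hc]
        simp [hc]

theorem pv_splitOn_eq_pvParts (l : List Char) : PySem.Chars.splitOn l [';'] = pvParts l := by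
  rw [PySem.Chars.splitOn, pv_go_split (l.length + 1) l [] [] (by omega)]
  rw [pvParts]
  simp

theorem pv_goM0 : ∀ (fuel : Nat) (tl : List Char) (acc : List (List Char)), 0 < fuel →
    PySem.Chars.splitOnMax.go [':'] fuel 0 tl [] acc = acc.reverse ++ [tl] := by
  intro fuel tl acc hf
  match fuel, tl with
  | f + 1, [] => simp [PySem.Chars.splitOnMax.go]
  | f + 1, c :: r => simp [PySem.Chars.splitOnMax.go]

theorem pv_goM1 : ∀ (a : List Char), ':' ∉ a → ∀ (tl : List Char) (fuel : Nat) (cur : List Char)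
    (acc : List (List Char)), (a ++ ':' :: tl).length < fuel →
    PySem.Chars.splitOnMax.go [':'] fuel 1 (a ++ ':' :: tl) cur acc =
      acc.reverse ++ [cur.reverse ++ a, tl] := by
  intro a
  induction a with
  | nil =>
    intro _ tl fuel cur acc hf
    match fuel with
    | f + 1 =>
      simp only [List.nil_append]
      rw [PySem.Chars.splitOnMax.go]
      have hpre : [':'].isPrefixOf (':' :: tl) = true := by
        simp [List.isPrefixOf]
      rw [hpre]
      simp only [List.length_cons, List.nil_append] at hf
      simp only [if_true, List.length_cons, List.length_nil, List.drop_succ_cons, List.drop_zero]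
      rw [pv_goM0 f tl (cur.reverse :: acc) (by omega)]
      simp
  | cons c a' ih =>
    intro hnot tl fuel cur acc hf
    have hc : c ≠ ':' := fun hh => hnot (by simp [hh])
    have hnot' : ':' ∉ a' := fun hh => hnot (List.mem_cons_of_mem _ hh)
    match fuel with
    | f + 1 =>
      simp only [List.cons_append]
      rw [PySem.Chars.splitOnMax.go]
      have hpre : [':'].isPrefixOf (c :: (a' ++ ':' :: tl)) = false := by
        simp [List.isPrefixOf]
        exact fun hh => absurd hh.symm hc
      rw [hpre]
      have hf' : (a' ++ ':' :: tl).length < f := by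
        simp at hf
        simp
        omega
      simp only [Bool.false_eq_true, if_false, if_neg (by omega : ¬ (1 : Nat) = 0)]
      rw [ih hnot' tl f (c :: cur) acc hf']
      simp

theorem pv_splitOnMax1 (a tl : List Char) (h : ':' ∉ a) :
    PySem.Chars.splitOnMax (a ++ ':' :: tl) [':'] 1 = [a, tl] := by
  rw [PySem.Chars.splitOnMax]
  rw [if_neg (by omega : ¬ (1 : Int) < 0)]
  have : (1 : Int).toNat = 1 := rfl
  rw [this, pv_goM1 a h tl ((a ++ ':' :: tl).length + 1) [] [] (by omega)]
  simp

theorem pv_find_go_semi : ∀ (l : List Char) (k : Nat),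
    PySem.Chars.find.go [';'] l k =
      if ';' ∈ l then ((k : Int) + (l.takeWhile (· ≠ ';')).length) else -1 := by
  intro l
  induction l with
  | nil => intro k; simp [PySem.Chars.find.go]
  | cons c t ih =>
    intro k
    by_cases hc : c = ';'
    · subst hc
      simp [PySem.Chars.find.go, List.isPrefixOf]
    · rw [PySem.Chars.find.go]
      have hpre : [';'].isPrefixOf (c :: t) = false := by
        simp [List.isPrefixOf]
        exact fun h => absurd h.symm hc
      rw [hpre]
      simp only [Bool.false_eq_true, if_false, ih (k + 1)]
      by_cases hm : ';' ∈ t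
      · simp [hm, hc]
        ring
      · simp [hm, hc]
        intro h
        exact absurd h.symm hc

theorem pv_find_semi (l : List Char) :
    PySem.Chars.find l [';'] =
      if ';' ∈ l then ((l.takeWhile (· ≠ ';')).length : Int) else -1 := by
  have := pv_find_go_semi l 0
  simp only [PySem.Chars.find, Nat.cast_zero, zero_add] at this ⊢
  exact this

-- go on the pattern ";claimed-by:" : shifting the start index
theorem pv_go_shift : ∀ (l : List Char) (k : Nat),
    PySem.Chars.find.go ";claimed-by:".toList l k =
      if PySem.Chars.find.go ";claimed-by:".toList l 0 < 0 then -1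
      else PySem.Chars.find.go ";claimed-by:".toList l 0 + k := by
  intro l
  induction l with
  | nil => intro k; simp [PySem.Chars.find.go]
  | cons c t ih =>
    intro k
    by_cases hp : (";claimed-by:".toList).isPrefixOf (c :: t) = true
    · rw [PySem.Chars.find.go, hp]
      rw [PySem.Chars.find.go, hp]
      simp
    · simp only [Bool.not_eq_true] at hp
      rw [PySem.Chars.find.go, hp]
      conv_rhs => rw [PySem.Chars.find.go, hp]
      simp only [Bool.false_eq_true, if_false]
      rw [ih (k + 1), ih 1]
      by_cases hg : PySem.Chars.find.go ";claimed-by:".toList t 0 < 0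
      · rw [if_pos hg, if_pos hg, if_pos (by omega : (-1 : Int) < 0)]
      · rw [if_neg hg, if_neg hg]
        split_ifs with h2
        · omega
        · push_cast
          ring

-- go on the pattern ";claimed-by:" over a ';'-free list finds nothing
theorem pv_go_nosemi : ∀ (l : List Char), ';' ∉ l → ∀ (k : Nat),
    PySem.Chars.find.go ";claimed-by:".toList l k = -1 := by
  intro l
  induction l with
  | nil => intro _ k; simp [PySem.Chars.find.go]
  | cons c t ih =>
    intro hm k
    have hc : c ≠ ';' := fun hh => hm (by simp [hh])
    have hpre : (";claimed-by:".toList).isPrefixOf (c :: t) = false := by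
      simp [List.isPrefixOf]
      intro hh
      exact absurd hh.symm hc
    rw [PySem.Chars.find.go, hpre]
    simp only [Bool.false_eq_true, if_false]
    exact ih (fun hh => hm (List.mem_cons_of_mem _ hh)) (k + 1)

-- go skips a ';'-free block (each head differs from the pattern's leading ';')
theorem pv_go_skip : ∀ (t : List Char), ';' ∉ t → ∀ (r : List Char) (k : Nat),
    PySem.Chars.find.go ";claimed-by:".toList (t ++ ';' :: r) k =
      PySem.Chars.find.go ";claimed-by:".toList (';' :: r) (k + t.length) := by
  intro t
  induction t with
  | nil => intro _ r k; simp
  | cons c t' ih =>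
    intro hm r k
    have hc : c ≠ ';' := fun hh => hm (by simp [hh])
    have hpre : (";claimed-by:".toList).isPrefixOf (c :: (t' ++ ';' :: r)) = false := by
      simp [List.isPrefixOf]
      intro hh
      exact absurd hh.symm hc
    rw [List.cons_append, PySem.Chars.find.go, hpre]
    simp only [Bool.false_eq_true, if_false]
    rw [ih (fun hh => hm (List.mem_cons_of_mem _ hh)) r (k + 1)]
    congr 1
    simp
    omega

theorem pv_find_prefix (l : List Char) (h : "claimed-by:".toList <+: l) :
    PySem.Chars.find (';' :: l) ";claimed-by:".toList = 0 := by
  rw [PySem.Chars.find, PySem.Chars.find.go]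
  have hpre : (";claimed-by:".toList).isPrefixOf (';' :: l) = true := by
    rw [show ";claimed-by:".toList = ';' :: "claimed-by:".toList from by decide]
    rw [show (';' :: "claimed-by:".toList).isPrefixOf (';' :: l) =
      ("claimed-by:".toList).isPrefixOf l from by simp [List.isPrefixOf]]
    exact List.isPrefixOf_iff_prefix.mpr h
  rw [hpre]
  simp

theorem pv_find_nosemi (l : List Char) (hm : ';' ∉ l) (h : ¬ "claimed-by:".toList <+: l) :
    PySem.Chars.find (';' :: l) ";claimed-by:".toList = -1 := by
  rw [PySem.Chars.find, PySem.Chars.find.go]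
  have hpre : (";claimed-by:".toList).isPrefixOf (';' :: l) = false := by
    rw [show ";claimed-by:".toList = ';' :: "claimed-by:".toList from by decide]
    rw [show (';' :: "claimed-by:".toList).isPrefixOf (';' :: l) =
      ("claimed-by:".toList).isPrefixOf l from by simp [List.isPrefixOf]]
    exact Bool.eq_false_iff.mpr (fun hc => h (List.isPrefixOf_iff_prefix.mp hc))
  rw [hpre]
  simp only [Bool.false_eq_true, if_false]
  exact pv_go_nosemi l hm 1

theorem pv_find_step (t r : List Char) (ht : ';' ∉ t)
    (h : ¬ "claimed-by:".toList <+: (t ++ ';' :: r)) :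
    PySem.Chars.find (';' :: (t ++ ';' :: r)) ";claimed-by:".toList =
      if PySem.Chars.find (';' :: r) ";claimed-by:".toList < 0 then -1
      else PySem.Chars.find (';' :: r) ";claimed-by:".toList + (1 + (t.length : Int)) := by
  rw [PySem.Chars.find, PySem.Chars.find.go]
  have hpre : (";claimed-by:".toList).isPrefixOf (';' :: (t ++ ';' :: r)) = false := by
    rw [show ";claimed-by:".toList = ';' :: "claimed-by:".toList from by decide]
    rw [show (';' :: "claimed-by:".toList).isPrefixOf (';' :: (t ++ ';' :: r)) =
      ("claimed-by:".toList).isPrefixOf (t ++ ';' :: r) from by simp [List.isPrefixOf]]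
    exact Bool.eq_false_iff.mpr (fun hc => h (List.isPrefixOf_iff_prefix.mp hc))
  rw [hpre]
  simp only [Bool.false_eq_true, if_false]
  rw [pv_go_skip t ht r 1, pv_go_shift (';' :: r) (1 + t.length)]
  rw [PySem.Chars.find]
  by_cases hg : PySem.Chars.find.go ";claimed-by:".toList (';' :: r) 0 < 0
  · rw [if_pos hg, if_pos hg]
  · rw [if_neg hg, if_neg hg]
    push_cast
    ring

-- part = takeWhile is a prefix of l, so a "claimed-by:" prefix transfers up and down
theorem pv_prefix_iff (l : List Char) :
    "claimed-by:".toList <+: l ↔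
      PySem.Chars.startswith (l.takeWhile (· ≠ ';')) "claimed-by:".toList = true := by
  constructor
  · intro h
    obtain ⟨s, rfl⟩ := h
    rw [PySem.Chars.startswith_iff]
    rw [List.takeWhile_append, if_pos (by decide)]
    exact List.prefix_append _ _
  · intro h
    have h1 := (PySem.Chars.startswith_iff _ _).mp h
    exact h1.trans (List.takeWhile_prefix _)

-- A's loop equals B's find-based computation
theorem pv_loop_eq_B : ∀ (l : List Char), get_claimed_by_loop (pvParts l) = pvB l := by
  have main : ∀ (n : Nat) (l : List Char), l.length ≤ n →
      get_claimed_by_loop (pvParts l) = pvB l := by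
    intro n
    induction n with
    | zero =>
      intro l hl
      have : l = [] := List.length_eq_zero_iff.mp (Nat.le_zero.mp hl)
      subst this
      have h1 : pvParts [] = [[]] := by rw [pvParts]; simp
      rw [h1]
      decide
    | succ n ih =>
      intro l hl
      rw [pvParts_head_tail l]
      by_cases hK : "claimed-by:".toList <+: l
      · -- the first occurrence is at the front: l = "claimed-by:" ++ s'
        obtain ⟨s', rfl⟩ := hK
        have htw : List.takeWhile (fun x => decide (x ≠ ';')) ("claimed-by:".toList ++ s') =
            "claimed-by:".toList ++ List.takeWhile (fun x => decide (x ≠ ';')) s' := by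
          rw [List.takeWhile_append, if_pos (by decide)]
        have hp2 : PySem.Chars.startswith
            ("claimed-by:".toList ++ List.takeWhile (fun x => decide (x ≠ ';')) s')
            "claimed-by:".toList = true :=
          (PySem.Chars.startswith_iff _ _).mpr (List.prefix_append _ _)
        rw [get_claimed_by_loop]
        simp only [htw, hp2, if_true]
        have hK : "claimed-by:".toList = "claimed-by".toList ++ ':' :: [] := by decide
        have hsplit : PySem.Chars.splitOnMax
            ("claimed-by:".toList ++ List.takeWhile (fun x => decide (x ≠ ';')) s') [':'] 1 =
            ["claimed-by".toList, List.takeWhile (fun x => decide (x ≠ ';')) s'] := by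
          rw [hK]
          rw [show ("claimed-by".toList ++ ':' :: []) ++ List.takeWhile (fun x => decide (x ≠ ';')) s' =
            "claimed-by".toList ++ ':' :: List.takeWhile (fun x => decide (x ≠ ';')) s' from by simp]
          exact pv_splitOnMax1 _ _ (by decide)
        rw [hsplit]
        have hget : PySem.List.pyGet?
            ["claimed-by".toList, List.takeWhile (fun x => decide (x ≠ ';')) s'] (1 : Int) =
            some (List.takeWhile (fun x => decide (x ≠ ';')) s') := by
          simp [PySem.List.pyGet?, PySem.List.pyIdx?]
        rw [hget]
        -- now the B side
        rw [pvB_eq]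
        rw [pv_find_prefix _ (List.prefix_append _ _)]
        simp only [if_neg (by omega : ¬ (0 : Int) < 0)]
        have hpay : PySem.Chars.slice (';' :: ("claimed-by:".toList ++ s'))
            (some ((0 : Int) + 12)) none = s' := by
          rw [PySem.Chars.slice_eq_listSlice, PySem.List.slice_from _ (by omega)]
          rw [show (((0 : Int) + 12).toNat) = 12 from by decide]
          rw [List.drop_succ_cons]
          exact List.drop_left' (by decide)
        rw [hpay, pv_find_semi s']
        by_cases hm : ';' ∈ s'
        · rw [if_pos hm, if_pos (by positivity)]
          rw [PySem.Chars.slice_eq_listSlice, PySem.List.slice_to _ (by positivity)]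
          rw [Int.toNat_natCast]
          have hsp := List.takeWhile_append_dropWhile (p := fun x => decide (x ≠ ';')) (l := s')
          set tws := List.takeWhile (fun x => decide (x ≠ ';')) s' with htws
          set dws := List.dropWhile (fun x => decide (x ≠ ';')) s' with hdws
          rw [← hsp, List.take_left]
        · rw [if_neg hm, if_neg (by omega)]
          rw [List.takeWhile_eq_self_iff.mpr (by
            intro x hx
            simp
            intro hxx
            subst hxx
            exact hm hx)]
      · -- the first part does not start with "claimed-by:"
        have hptw : PySem.Chars.startswith (List.takeWhile (fun x => decide (x ≠ ';')) l)
            "claimed-by:".toList = false := by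
          by_contra hcon
          simp only [Bool.not_eq_false] at hcon
          exact hK ((pv_prefix_iff l).mpr hcon)
        rw [get_claimed_by_loop, hptw]
        simp only [Bool.false_eq_true, if_false]
        by_cases hm : ';' ∈ l
        · -- l = t ++ ';' :: r : the loop moves to the next part, the find skips past the ';'
          have hdw : List.dropWhile (fun x => decide (x ≠ ';')) l =
              ';' :: (List.dropWhile (fun x => decide (x ≠ ';')) l).tail := by
            obtain ⟨c, tl, hdd⟩ : ∃ c tl, List.dropWhile (fun x => decide (x ≠ ';')) l = c :: tl := by
              cases hdd : List.dropWhile (fun x => decide (x ≠ ';')) l with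
              | nil =>
                have := (List.dropWhile_eq_nil_iff).mp hdd ';' hm
                simp at this
              | cons c tl => exact ⟨c, tl, rfl⟩
            have hne : List.dropWhile (fun x => decide (x ≠ ';')) l ≠ [] := by
              rw [hdd]; simp
            have hhd := List.head_dropWhile_not (p := fun x => decide (x ≠ ';')) hne
            simp only [hdd, List.head_cons] at hhd
            simp at hhd
            rw [hdd, hhd]
            simp
          set t := List.takeWhile (fun x => decide (x ≠ ';')) l with htdef
          set r := (List.dropWhile (fun x => decide (x ≠ ';')) l).tail with hrdef
          have hlr : l = t ++ ';' :: r := by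
            conv_lhs => rw [← List.takeWhile_append_dropWhile (p := fun x => decide (x ≠ ';')) (l := l)]
            rw [hdw]
          have htns : ';' ∉ t := by
            intro hmem
            have := List.mem_takeWhile_imp (htdef ▸ hmem)
            simp at this
          have htail : (pvParts l).tail = pvParts r := by
            rw [pvParts, dif_pos hm]
            simp only [List.tail_cons]
            rfl
          rw [htail]
          have hdw_le := List.length_dropWhile_le (fun x => decide (x ≠ ';')) l
          have hdw_pos : 0 < (List.dropWhile (fun x => decide (x ≠ ';')) l).length := by
            rw [hdw]
            simp
          have hrlen : r.length ≤ n := by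
            rw [hrdef]
            simp only [List.length_tail]
            omega
          rw [ih r hrlen]
          -- pvB r = pvB l
          rw [pvB_eq r, pvB_eq l]
          conv_rhs => rw [hlr]
          rw [pv_find_step t r htns (hlr ▸ hK)]
          by_cases hg : PySem.Chars.find (';' :: r) ";claimed-by:".toList < 0
          · rw [if_pos hg, if_pos hg]
            norm_num
          · rw [if_neg hg, if_neg hg]
            rw [if_neg (show ¬ PySem.Chars.find (';' :: r) ";claimed-by:".toList +
              (1 + (t.length : Int)) < 0 from by omega)]
            have hpay : PySem.Chars.slice (';' :: (t ++ ';' :: r))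
                (some (PySem.Chars.find (';' :: r) ";claimed-by:".toList + (1 + (t.length : Int)) + 12)) none =
                PySem.Chars.slice (';' :: r)
                  (some (PySem.Chars.find (';' :: r) ";claimed-by:".toList + 12)) none := by
              rw [PySem.Chars.slice_eq_listSlice, PySem.List.slice_from _ (by omega)]
              rw [PySem.Chars.slice_eq_listSlice, PySem.List.slice_from _ (by omega)]
              have harith : (PySem.Chars.find (';' :: r) ";claimed-by:".toList + (1 + (t.length : Int)) + 12).toNat =
                  (';' :: t).length + (PySem.Chars.find (';' :: r) ";claimed-by:".toList + 12).toNat := by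
                simp only [List.length_cons]
                omega
              rw [harith]
              rw [show (';' :: (t ++ ';' :: r)) = (';' :: t) ++ (';' :: r) from by simp]
              rw [List.drop_length_add_append]
            rw [hpay]
        · -- no further part: both sides return none
          have htail : (pvParts l).tail = [] := by
            rw [pvParts]
            simp [hm]
          rw [htail, get_claimed_by_loop]
          rw [pvB_eq]
          rw [pv_find_nosemi l hm hK]
          simp
  exact fun l => main l.length l le_rfl

-- ===== VERDICT (by name: the statement is the Claim_ definition above) =====
theorem get_claimed_by_spec : Claim_equal_get_claimed_by := by
  intro topic _
  unfold Spec_get_claimed_by get_claimed_by get_claimed_by_alt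
  match topic with
  | none => rfl
  | some t =>
    simp only
    split
    · rfl
    · rw [pv_splitOn_eq_pvParts, pv_loop_eq_B]
      rfl
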